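-- pv_equiv track=rewrite | github.com/jacsice/leetcode | top_1_2.py | top_1_2
-- ===== SOURCE A (Python) =====
-- def top_1_2(nums):
--     top1 = 0
--     top2 = 0
--     for num in nums:
--         if num > top1:
--             top2, top1 = top1, num
--         elif num > top2:
--             top2 = num
--     return top1, top2
-- ===== SOURCE B (Python) =====
-- def top_1_2(nums):
--     s = sorted(list(nums) + [0, 0], reverse=True)
--     return s[0], s[1]
-- ===== Notes on version B (the rewrite author's own statement) =====
-- stated objective: simpler
-- what changed: Replaces the manual single-pass top-two tracking with appending two zero floors, sorting in descending order, and taking the first two elements.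
import Mathlib
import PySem

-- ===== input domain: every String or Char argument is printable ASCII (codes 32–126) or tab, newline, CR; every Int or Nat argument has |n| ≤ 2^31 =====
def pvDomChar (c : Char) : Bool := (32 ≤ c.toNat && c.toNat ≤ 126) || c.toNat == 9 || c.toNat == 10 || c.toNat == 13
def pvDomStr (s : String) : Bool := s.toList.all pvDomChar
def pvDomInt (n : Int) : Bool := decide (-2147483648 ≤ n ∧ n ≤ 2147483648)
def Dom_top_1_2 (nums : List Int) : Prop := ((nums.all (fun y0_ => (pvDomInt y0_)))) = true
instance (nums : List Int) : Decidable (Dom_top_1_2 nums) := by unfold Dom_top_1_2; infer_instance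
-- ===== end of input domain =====

-- B replaces A's manual single-pass top-two tracking by sorting nums ++ [0,0] in
-- descending order and taking the first two elements (objective: simpler).

-- ===== PORT A =====
def top_1_2 (nums : List Int) : Int × Int :=
  nums.foldl
    (fun t num =>
      if num > t.1 then (num, t.1)
      else if num > t.2 then (t.1, num)
      else t)
    (0, 0)

-- ===== PORT B =====
-- s always has length ≥ 2 (the two appended zeros), so the indexing never falls
-- back to the .getD default: it is exactly Python's s[0], s[1].
def top_1_2_alt (nums : List Int) : Int × Int :=
  let s := PySem.List.sorted (nums ++ [0, 0]) (fun x => x) true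
  ((PySem.List.pyGet? s 0).getD 0, (PySem.List.pyGet? s 1).getD 0)

-- ===== PRECONDITION & SPEC =====
def Spec_top_1_2 (nums : List Int) (out : Int × Int) : Prop := out = top_1_2_alt nums
instance (nums : List Int) (out : Int × Int) : Decidable (Spec_top_1_2 nums out) := by unfold Spec_top_1_2; infer_instance

-- ===== CLAIM (what is proved, stated in full; the proofs are below) =====
def Claim_equal_top_1_2 : Prop := ∀ (nums : List Int), Dom_top_1_2 nums → Spec_top_1_2 nums (top_1_2 nums)

-- ===== LEMMAS AND PROOFS =====

-- A's loop body as a named step function (definitionally the lambda in the port).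
def pvStep (t : Int × Int) (num : Int) : Int × Int :=
  if num > t.1 then (num, t.1)
  else if num > t.2 then (t.1, num)
  else t

-- Insert into a descending-sorted list, after any equal elements.
def pvIns (x : Int) : List Int → List Int
  | [] => [x]
  | y :: ys => if x > y then x :: y :: ys else y :: pvIns x ys

lemma pvIns_perm (x : Int) (l : List Int) : (pvIns x l).Perm (x :: l) := by
  induction l with
  | nil => simp [pvIns]
  | cons y ys ih =>
      simp only [pvIns]
      split_ifs with h
      · exact List.Perm.refl _
      · exact (ih.cons y).trans (List.Perm.swap x y ys)

lemma pvIns_pairwise (x : Int) (l : List Int)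
    (h : l.Pairwise (fun a b => b ≤ a)) : (pvIns x l).Pairwise (fun a b => b ≤ a) := by
  induction l with
  | nil => simp [pvIns]
  | cons y ys ih =>
      rcases List.pairwise_cons.mp h with ⟨hy, hys⟩
      simp only [pvIns]
      split_ifs with hxy
      · exact List.pairwise_cons.mpr ⟨by
          intro a ha
          rcases List.mem_cons.mp ha with ha | ha
          · omega
          · have := hy a ha; omega, h⟩
      · refine List.pairwise_cons.mpr ⟨?_, ih hys⟩
        intro a ha
        rcases List.mem_cons.mp ((pvIns_perm x ys).mem_iff.mp ha) with ha | ha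
        · omega
        · exact hy a ha

-- Inserting into a list with at least two elements: the new first two elements
-- are exactly A's step applied to the old first two.
lemma pvIns_head2 (x a b : Int) (rest : List Int) :
    ∃ rest', pvIns x (a :: b :: rest) = (pvStep (a, b) x).1 :: (pvStep (a, b) x).2 :: rest' := by
  simp only [pvIns, pvStep]
  split_ifs with h1 h2
  · exact ⟨b :: rest, rfl⟩
  · exact ⟨b :: rest, rfl⟩
  · exact ⟨pvIns x rest, rfl⟩

-- A's fold equals the first two elements of insertion-sorting on top of the accumulator.
lemma pvFold_eq (xs : List Int) : ∀ (a b : Int) (rest : List Int),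
    xs.foldl pvStep (a, b) =
      (((xs.foldl (fun acc x => pvIns x acc) (a :: b :: rest)).headI),
       ((xs.foldl (fun acc x => pvIns x acc) (a :: b :: rest)).tail.headI)) := by
  induction xs with
  | nil => intro a b rest; simp
  | cons x xs ih =>
      intro a b rest
      rcases pvIns_head2 x a b rest with ⟨rest', hr⟩
      simp only [List.foldl_cons, hr]
      exact ih (pvStep (a, b) x).1 (pvStep (a, b) x).2 rest'

lemma pvFoldIns_perm (xs : List Int) : ∀ (acc : List Int),
    (xs.foldl (fun acc x => pvIns x acc) acc).Perm (acc ++ xs) := by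
  induction xs with
  | nil => intro acc; simp
  | cons x xs ih =>
      intro acc
      simp only [List.foldl_cons]
      refine (ih (pvIns x acc)).trans ?_
      refine ((pvIns_perm x acc).append_right xs).trans ?_
      refine (((List.perm_append_singleton x acc).symm).append_right xs).trans ?_
      exact List.Perm.of_eq (by simp)

lemma pvFoldIns_pairwise (xs : List Int) : ∀ (acc : List Int),
    acc.Pairwise (fun a b => b ≤ a) →
    (xs.foldl (fun acc x => pvIns x acc) acc).Pairwise (fun a b => b ≤ a) := by
  induction xs with
  | nil => intro acc h; simpa using h
  | cons x xs ih =>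
      intro acc h
      simpa using ih (pvIns x acc) (pvIns_pairwise x acc h)

-- The PySem descending sort equals our insertion-sort fold (two descending-sorted
-- permutations of the same list are equal).
lemma pvSorted_eq (nums : List Int) :
    PySem.List.sorted (nums ++ [0, 0]) (fun x => x) true =
      nums.foldl (fun acc x => pvIns x acc) [0, 0] := by
  have hinj : Function.Injective (fun x : Int => -x) := fun a b h => by
    simpa using neg_injective h
  have hperm : (PySem.List.sorted (nums ++ [0, 0]) (fun x => x) true).Perm
      (nums.foldl (fun acc x => pvIns x acc) [0, 0]) := by
    refine (PySem.List.sorted_perm _ _ _).trans ?_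
    refine (List.perm_append_comm).trans ?_
    exact (pvFoldIns_perm nums [0, 0]).symm
  have h1 : (PySem.List.sorted (nums ++ [0, 0]) (fun x => x) true).Pairwise
      (fun a b => (fun x : Int => -x) a ≤ (fun x : Int => -x) b) := by
    have := PySem.List.sorted_pairwise_rev (xs := nums ++ [0, 0]) (key := fun x => x)
    exact this.imp (by intro a b h; simpa using h)
  have h2 : (nums.foldl (fun acc x => pvIns x acc) [0, 0]).Pairwise
      (fun a b => (fun x : Int => -x) a ≤ (fun x : Int => -x) b) := by
    have := pvFoldIns_pairwise nums [0, 0] (by simp)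
    exact this.imp (by intro a b h; simpa using h)
  exact PySem.List.eq_of_perm_of_pairwise_le_of_injective _ hinj hperm h1 h2

lemma pvLen2 (nums : List Int) :
    ∃ a b rest, nums.foldl (fun acc x => pvIns x acc) [0, 0] = a :: b :: rest := by
  have h := (pvFoldIns_perm nums [0, 0]).length_eq
  set l := nums.foldl (fun acc x => pvIns x acc) [0, 0] with hl
  match l, h with
  | a :: b :: rest, _ => exact ⟨a, b, rest, rfl⟩

-- ===== VERDICT (by name: the statement is the Claim_ definition above) =====
theorem top_1_2_spec : Claim_equal_top_1_2 := by
  intro nums _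
  unfold Spec_top_1_2 top_1_2 top_1_2_alt
  rcases pvLen2 nums with ⟨a, b, rest, hS⟩
  have hA : nums.foldl
      (fun t num =>
        if num > t.1 then (num, t.1)
        else if num > t.2 then (t.1, num)
        else t) (0, 0) = (a, b) := by
    have := pvFold_eq nums 0 0 []
    rw [show ([(0 : Int), 0] = (0 : Int) :: 0 :: ([] : List Int)) from rfl] at hS
    rw [hS] at this
    simpa [pvStep] using this
  rw [hA, pvSorted_eq, hS]
  have hpos : (0:Int) ≤ (rest.length : Int) + 1 := by positivity
  simp [PySem.List.pyGet?, PySem.List.pyIdx?, hpos]
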